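-- pv_equiv track=rewrite | github.com/LucPettett/what-do-i-become | src/wdib/control/human_messages.py | is_terminate_command
-- ===== SOURCE A (Python) =====
-- def is_terminate_command(message_text: str) -> bool:
--     """Heuristic parser for human stop/terminate instructions."""
--     lowered = str(message_text or "").strip().lower()
--     if not lowered:
--         return False
--     markers = (
--         "terminate",
--         "shutdown",
--         "shut down",
--         "power down",
--         "stop this device",
--         "stop device",
--         "kill command",
--         "kill wdib",
--         "goodbye",
--     )
--     return any(marker in lowered for marker in markers)
-- ===== SOURCE B (Python) =====
-- def is_terminate_command(message_text: str) -> bool: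
--     """Heuristic parser for human stop/terminate instructions."""
--     lowered = str(message_text or "").strip().lower()
--     if not lowered:
--         return False
--     markers = (
--         "terminate",
--         "shutdown",
--         "shut down",
--         "power down",
--         "stop this device",
--         "stop device",
--         "kill command",
--         "kill wdib",
--         "goodbye",
--     )
--     # single left-to-right scan: at each position test whether some marker starts there
--     return any(
--         any(lowered.startswith(m, i) for m in markers)
--         for i in range(len(lowered))
--     )
-- ===== Notes on version B (the rewrite author's own statement) =====
-- stated objective: alternative
-- what changed: Replaces A's per-marker substring searches (one full scan of the text per marker) by a single left-to-right scan over positions that tests all markers as prefixes at each position, the traversal a regex alternation would do.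
import Mathlib
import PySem

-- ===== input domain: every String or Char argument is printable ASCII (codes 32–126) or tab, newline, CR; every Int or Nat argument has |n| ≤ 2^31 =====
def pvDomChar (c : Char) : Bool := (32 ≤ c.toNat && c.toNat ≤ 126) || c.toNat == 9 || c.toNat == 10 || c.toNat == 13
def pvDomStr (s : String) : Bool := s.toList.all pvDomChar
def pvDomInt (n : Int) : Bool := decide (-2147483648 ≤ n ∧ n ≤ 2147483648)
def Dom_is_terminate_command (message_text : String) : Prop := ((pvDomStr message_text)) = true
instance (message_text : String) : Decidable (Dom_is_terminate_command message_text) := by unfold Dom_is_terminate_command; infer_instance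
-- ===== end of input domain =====

-- B changes only the search strategy (one positional scan testing all markers as prefixes,
-- instead of one substring search per marker); objective: alternative, same cost.

-- the marker tuple shared verbatim by both sources
def pvMarkers : List (List Char) :=
  ["terminate".toList, "shutdown".toList, "shut down".toList, "power down".toList,
   "stop this device".toList, "stop device".toList, "kill command".toList,
   "kill wdib".toList, "goodbye".toList]

-- ===== PORT A =====
def is_terminate_command (message_text : String) : Bool :=
  -- str(message_text or "").strip().lower(); 'message_text or ""' is message_text unless empty
  let base : String := if message_text.toList = [] then "" else message_text
  let lowered : List Char := PySem.Chars.lower (PySem.Chars.strip base.toList)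
  if lowered = [] then false
  else pvMarkers.any (fun m => PySem.Chars.isIn m lowered)

-- ===== PORT B =====
-- any over positions i of lowered (each i ↔ the suffix lowered.drop i), testing all markers as prefixes
def pvScan : List Char → Bool
  | [] => false
  | c :: rest =>
      pvMarkers.any (fun m => PySem.Chars.startswith (c :: rest) m) || pvScan rest

def is_terminate_command_alt (message_text : String) : Bool :=
  let base : String := if message_text.toList = [] then "" else message_text
  let lowered : List Char := PySem.Chars.lower (PySem.Chars.strip base.toList)
  if lowered = [] then false
  else pvScan lowered

-- ===== PRECONDITION & SPEC =====
def Spec_is_terminate_command (message_text : String) (out : Bool) : Prop := out = is_terminate_command_alt message_text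
instance (message_text : String) (out : Bool) : Decidable (Spec_is_terminate_command message_text out) := by unfold Spec_is_terminate_command; infer_instance

-- ===== CLAIM (what is proved, stated in full; the proofs are below) =====
def Claim_equal_is_terminate_command : Prop := ∀ (message_text : String), Dom_is_terminate_command message_text → Spec_is_terminate_command message_text (is_terminate_command message_text)

-- ===== LEMMAS AND PROOFS =====

-- the scan finds exactly the inputs with some marker prefixing some suffix
theorem pvScan_iff (s : List Char) :
    pvScan s = true ↔ ∃ j, ∃ m ∈ pvMarkers, m <+: s.drop j := by
  induction s with
  | nil =>
      simp only [pvScan]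
      constructor
      · intro h; exact absurd h (by simp)
      · rintro ⟨j, m, hm, hp⟩
        simp only [List.drop_nil] at hp
        have : m = [] := List.prefix_nil.mp hp
        subst this
        revert hm; decide
  | cons c rest ih =>
      simp only [pvScan, Bool.or_eq_true, List.any_eq_true, ih]
      constructor
      · rintro (⟨m, hm, hsw⟩ | ⟨j, m, hm, hp⟩)
        · exact ⟨0, m, hm, (PySem.Chars.startswith_iff _ _).mp hsw⟩
        · exact ⟨j + 1, m, hm, by simpa using hp⟩
      · rintro ⟨j, m, hm, hp⟩
        cases j with
        | zero => exact Or.inl ⟨m, hm, (PySem.Chars.startswith_iff _ _).mpr (by simpa using hp)⟩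
        | succ j => exact Or.inr ⟨j, m, hm, by simpa using hp⟩

theorem pvScan_eq_any_isIn (s : List Char) :
    pvScan s = pvMarkers.any (fun m => PySem.Chars.isIn m s) := by
  by_cases h : pvScan s = true
  · rw [h]
    obtain ⟨j, m, hm, hp⟩ := (pvScan_iff s).mp h
    symm
    simp only [List.any_eq_true]
    exact ⟨m, hm, (PySem.Chars.exists_prefix_drop_iff_isIn m s).mp ⟨j, hp⟩⟩
  · rw [Bool.eq_false_iff.mpr h]
    symm
    rw [Bool.eq_false_iff]
    intro hc
    apply h
    rw [pvScan_iff]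
    simp only [List.any_eq_true] at hc
    obtain ⟨m, hm, hin⟩ := hc
    obtain ⟨j, hp⟩ := (PySem.Chars.exists_prefix_drop_iff_isIn m s).mpr hin
    exact ⟨j, m, hm, hp⟩

-- ===== VERDICT (by name: the statement is the Claim_ definition above) =====
theorem is_terminate_command_spec : Claim_equal_is_terminate_command := by
  intro message_text _
  unfold Spec_is_terminate_command is_terminate_command is_terminate_command_alt
  simp only
  split <;> rw [pvScan_eq_any_isIn]
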